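-- pv_equiv track=rewrite | github.com/navotvolkgroundup/groundup-toolkit | skills/founder-scout/modules/github_enhanced.py | detect_startup_infra
-- ===== SOURCE A (Python) =====
-- STARTUP_INFRA_FILES = {
--     'stripe': ['stripe', '.stripe'],
--     'vercel': ['vercel.json', '.vercel'],
--     'railway': ['railway.json', 'railway.toml'],
--     'render': ['render.yaml'],
--     'docker': ['docker-compose.yml', 'docker-compose.yaml', 'Dockerfile'],
--     'auth0': ['auth0'],
--     'firebase': ['firebase.json', '.firebaserc'],
--     'supabase': ['supabase'],
-- }
--
-- STARTUP_INFRA_DEPS = {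
--     'stripe': ['stripe', '@stripe/stripe-js', '@stripe/react-stripe-js'],
--     'auth0': ['auth0', '@auth0/auth0-react', '@auth0/nextjs-auth0'],
--     'firebase': ['firebase', 'firebase-admin'],
--     'clerk': ['@clerk/nextjs', '@clerk/clerk-js'],
--     'supabase': ['@supabase/supabase-js'],
--     'paddle': ['@paddle/paddle-js'],
--     'lemon_squeezy': ['@lemonsqueezy/lemonsqueezy.js'],
-- }
--
-- def detect_startup_infra(file_list, readme_text=None):
--     """Check file list and README for startup infrastructure patterns.
--     Returns list of matched patterns like ['stripe', 'vercel', 'auth0'].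
--     """
--     matched = []
--     file_set = {f.lower() for f in file_list}
--
--     # Check file-based patterns
--     for infra_name, patterns in STARTUP_INFRA_FILES.items():
--         for pattern in patterns:
--             if pattern.lower() in file_set:
--                 matched.append(infra_name)
--                 break
--
--     # Check if package.json is present (we'd need to fetch it for dep analysis,
--     # but we can detect the file's existence)
--     if 'package.json' in file_set:
--         # Flag for further dep analysis; the caller should fetch package.json
--         # and check STARTUP_INFRA_DEPS if they want deeper insight
--         pass
--
--     # Check README for infra mentions
--     if readme_text:
--         readme_lower = readme_text.lower()
--         for infra_name, dep_names in STARTUP_INFRA_DEPS.items():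
--             if infra_name not in matched:
--                 for dep in dep_names:
--                     if dep.lower() in readme_lower:
--                         matched.append(infra_name)
--                         break
--
--     return list(set(matched))
-- ===== SOURCE B (Python) =====
-- STARTUP_INFRA_FILES = {
--     'stripe': ['stripe', '.stripe'],
--     'vercel': ['vercel.json', '.vercel'],
--     'railway': ['railway.json', 'railway.toml'],
--     'render': ['render.yaml'],
--     'docker': ['docker-compose.yml', 'docker-compose.yaml', 'Dockerfile'],
--     'auth0': ['auth0'],
--     'firebase': ['firebase.json', '.firebaserc'],
--     'supabase': ['supabase'],
-- }
--
-- STARTUP_INFRA_DEPS = {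
--     'stripe': ['stripe', '@stripe/stripe-js', '@stripe/react-stripe-js'],
--     'auth0': ['auth0', '@auth0/auth0-react', '@auth0/nextjs-auth0'],
--     'firebase': ['firebase', 'firebase-admin'],
--     'clerk': ['@clerk/nextjs', '@clerk/clerk-js'],
--     'supabase': ['@supabase/supabase-js'],
--     'paddle': ['@paddle/paddle-js'],
--     'lemon_squeezy': ['@lemonsqueezy/lemonsqueezy.js'],
-- }
--
-- # Reverse index: lowercased file pattern -> infra name (patterns are unique).
-- _FILE_INDEX = {p.lower(): name
--                for name, pats in STARTUP_INFRA_FILES.items() for p in pats}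
--
--
-- def detect_startup_infra(file_list, readme_text=None):
--     """Check file list and README for startup infrastructure patterns.
--     Returns list of matched patterns like ['stripe', 'vercel', 'auth0'].
--     """
--     file_set = {f.lower() for f in file_list}
--     hits = {_FILE_INDEX[f] for f in file_set if f in _FILE_INDEX}
--     result = [name for name in STARTUP_INFRA_FILES if name in hits]
--     if readme_text:
--         readme_lower = readme_text.lower()
--         result += [name for name, deps in STARTUP_INFRA_DEPS.items()
--                    if any(d.lower() in readme_lower for d in deps)]
--     return list(set(result))
-- ===== Notes on version B (the rewrite author's own statement) =====
-- stated objective: alternative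
-- what changed: B inverts A's infra-by-pattern membership scan into a precomputed reverse index (lowercased pattern -> infra) looked up once per distinct file, drops A's redundant 'not in matched' guard on the README scan (the final set() already dedups), and builds the result by comprehensions instead of append-and-break loops.
import Mathlib
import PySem

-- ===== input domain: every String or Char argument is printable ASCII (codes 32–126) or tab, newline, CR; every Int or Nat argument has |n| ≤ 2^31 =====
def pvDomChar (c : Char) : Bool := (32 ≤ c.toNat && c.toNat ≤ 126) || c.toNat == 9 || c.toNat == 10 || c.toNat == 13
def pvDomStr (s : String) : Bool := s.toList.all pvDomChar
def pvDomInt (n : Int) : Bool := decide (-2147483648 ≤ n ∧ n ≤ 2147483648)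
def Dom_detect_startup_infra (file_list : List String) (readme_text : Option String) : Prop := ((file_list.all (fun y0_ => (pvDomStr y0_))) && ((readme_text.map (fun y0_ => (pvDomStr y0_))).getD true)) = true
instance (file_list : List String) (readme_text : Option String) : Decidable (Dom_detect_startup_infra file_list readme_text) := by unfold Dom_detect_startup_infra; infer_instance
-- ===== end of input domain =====

-- B replaces A's per-infra scan over pattern lists by one reverse-index lookup per file and
-- drops the redundant 'not in matched' guard (the final set() dedups); objective: alternative.
-- Both programs return list(set(...)): the result is compared as a set (per task ret_compare), and
-- the ports return the distinct elements in first-insertion order.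

-- ===== PORT A =====
def sifFiles : List (String × List String) := [
  ("stripe", ["stripe", ".stripe"]),
  ("vercel", ["vercel.json", ".vercel"]),
  ("railway", ["railway.json", "railway.toml"]),
  ("render", ["render.yaml"]),
  ("docker", ["docker-compose.yml", "docker-compose.yaml", "Dockerfile"]),
  ("auth0", ["auth0"]),
  ("firebase", ["firebase.json", ".firebaserc"]),
  ("supabase", ["supabase"])]

def sifDeps : List (String × List String) := [
  ("stripe", ["stripe", "@stripe/stripe-js", "@stripe/react-stripe-js"]),
  ("auth0", ["auth0", "@auth0/auth0-react", "@auth0/nextjs-auth0"]),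
  ("firebase", ["firebase", "firebase-admin"]),
  ("clerk", ["@clerk/nextjs", "@clerk/clerk-js"]),
  ("supabase", ["@supabase/supabase-js"]),
  ("paddle", ["@paddle/paddle-js"]),
  ("lemon_squeezy", ["@lemonsqueezy/lemonsqueezy.js"])]

def detect_startup_infra (file_list : List String) (readme_text : Option String) : List String :=
  let file_set : PySem.Set String := PySem.Set.ofList (file_list.map PySem.Str.lower)
  -- for infra_name, patterns in STARTUP_INFRA_FILES.items(): for pattern in patterns: if …: append; break
  let matched : List String :=
    sifFiles.foldl (fun m pr =>
      if pr.2.any (fun pat => PySem.Set.contains file_set (PySem.Str.lower pat)) then m ++ [pr.1] else m) []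
  -- the 'package.json' check in A is a pass (no effect); nothing to port
  let matched : List String :=
    match readme_text with
    | some r =>
      if r ≠ "" then
        let readme_lower := PySem.Str.lower r
        sifDeps.foldl (fun m pr =>
          if m.contains pr.1 then m
          else if pr.2.any (fun dep => PySem.Str.isIn (PySem.Str.lower dep) readme_lower) then m ++ [pr.1]
          else m) matched
      else matched
    | none => matched
  PySem.Set.ofList matched

-- ===== PORT B =====
-- _FILE_INDEX = {p.lower(): name for name, pats in STARTUP_INFRA_FILES.items() for p in pats}
def sifIndex : PySem.Dict String String :=
  sifFiles.foldl (fun d pr => pr.2.foldl (fun d p => d.insert (PySem.Str.lower p) pr.1) d) PySem.Dict.empty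

def detect_startup_infra_alt (file_list : List String) (readme_text : Option String) : List String :=
  let file_set : PySem.Set String := PySem.Set.ofList (file_list.map PySem.Str.lower)
  -- hits = {_FILE_INDEX[f] for f in file_set if f in _FILE_INDEX}
  let hits : PySem.Set String :=
    PySem.Set.ofList (List.filterMap (fun f => PySem.Dict.get? sifIndex f) file_set)
  -- result = [name for name in STARTUP_INFRA_FILES if name in hits]
  let result : List String := (sifFiles.map Prod.fst).filter (fun n => PySem.Set.contains hits n)
  let result : List String :=
    result ++ (match readme_text with
      | some r =>
        if r ≠ "" then
          let readme_lower := PySem.Str.lower r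
          (sifDeps.filter (fun pr =>
            pr.2.any (fun dep => PySem.Str.isIn (PySem.Str.lower dep) readme_lower))).map Prod.fst
        else []
      | none => [])
  PySem.Set.ofList result

-- ===== PRECONDITION & SPEC =====
def Spec_detect_startup_infra (file_list : List String) (readme_text : Option String) (out : List String) : Prop := out = detect_startup_infra_alt file_list readme_text
instance (file_list : List String) (readme_text : Option String) (out : List String) : Decidable (Spec_detect_startup_infra file_list readme_text out) := by unfold Spec_detect_startup_infra; infer_instance

-- ===== CLAIM (what is proved, stated in full; the proofs are below) =====
def Claim_equal_detect_startup_infra : Prop := ∀ (file_list : List String) (readme_text : Option String), Dom_detect_startup_infra file_list readme_text → Spec_detect_startup_infra file_list readme_text (detect_startup_infra file_list readme_text)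

-- ===== LEMMAS AND PROOFS =====

-- the items of sifIndex written out (first-insertion order, keys already lowered)
def idxList : List (String × String) := [
  ("stripe", "stripe"), (".stripe", "stripe"),
  ("vercel.json", "vercel"), (".vercel", "vercel"),
  ("railway.json", "railway"), ("railway.toml", "railway"),
  ("render.yaml", "render"),
  ("docker-compose.yml", "docker"), ("docker-compose.yaml", "docker"), ("dockerfile", "docker"),
  ("auth0", "auth0"),
  ("firebase.json", "firebase"), (".firebaserc", "firebase"),
  ("supabase", "supabase")]

theorem idx_items : sifIndex.items = idxList := by decide

-- association-list lookup on a list with distinct keys is membership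
theorem find?_assoc (l : List (String × String)) (hnd : (l.map Prod.fst).Nodup) (f n : String) :
    (l.find? (fun p => p.1 == f)).map (fun p => p.2) = some n ↔ (f, n) ∈ l := by
  induction l with
  | nil => simp
  | cons a l ih =>
    simp only [List.map_cons, List.nodup_cons] at hnd
    by_cases hp : a.1 = f
    · subst hp
      rw [List.find?_cons_of_pos (by simp)]
      simp only [Option.map_some, List.mem_cons]
      constructor
      · rintro h; left; cases a; simpa using h.symm
      · rintro (h | h)
        · cases a; simp_all
        · exact absurd (List.mem_map_of_mem (f := Prod.fst) h) hnd.1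
    · rw [List.find?_cons_of_neg (by simp [hp]), ih hnd.2]
      simp only [List.mem_cons]
      constructor
      · exact Or.inr
      · rintro (h | h)
        · cases a; simp_all
        · exact h

theorem get?_idx (n : String) (P : List String) (hm : ∀ f, ((f, n) ∈ idxList ↔ f ∈ P)) :
    ∀ f, PySem.Dict.get? sifIndex f = some n ↔ f ∈ P := by
  intro f
  rw [← hm f, PySem.Dict.get?, idx_items]
  exact find?_assoc idxList (by decide) f n

theorem hits_contains (fs : List String) (n : String) (pats : List String)
    (h : ∀ f, PySem.Dict.get? sifIndex f = some n ↔ f ∈ pats.map PySem.Str.lower) :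
    PySem.Set.contains
      (PySem.Set.ofList (List.filterMap (fun f => PySem.Dict.get? sifIndex f) (PySem.Set.ofList fs))) n
      = pats.any (fun pat => PySem.Set.contains (PySem.Set.ofList fs) (PySem.Str.lower pat)) := by
  rw [Bool.eq_iff_iff]
  simp only [PySem.Set.contains]
  simp only [List.contains_iff_mem, PySem.Set.mem_ofList, List.mem_filterMap,
    List.any_eq_true, h, List.mem_map]
  constructor
  · rintro ⟨f, hf, pat, hpat, rfl⟩; exact ⟨pat, hpat, hf⟩
  · rintro ⟨pat, hpat, hp⟩; exact ⟨_, hp, pat, hpat, rfl⟩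

theorem idx_stripe : ∀ f, PySem.Dict.get? sifIndex f = some "stripe" ↔ f ∈ (["stripe", ".stripe"] : List String).map PySem.Str.lower := by
  have hmap : (["stripe", ".stripe"] : List String).map PySem.Str.lower = ["stripe", ".stripe"] := by decide
  rw [hmap]
  apply get?_idx
  intro f
  simp [idxList]
theorem idx_vercel : ∀ f, PySem.Dict.get? sifIndex f = some "vercel" ↔ f ∈ (["vercel.json", ".vercel"] : List String).map PySem.Str.lower := by
  have hmap : (["vercel.json", ".vercel"] : List String).map PySem.Str.lower = ["vercel.json", ".vercel"] := by decide
  rw [hmap]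
  apply get?_idx
  intro f
  simp [idxList]
theorem idx_railway : ∀ f, PySem.Dict.get? sifIndex f = some "railway" ↔ f ∈ (["railway.json", "railway.toml"] : List String).map PySem.Str.lower := by
  have hmap : (["railway.json", "railway.toml"] : List String).map PySem.Str.lower = ["railway.json", "railway.toml"] := by decide
  rw [hmap]
  apply get?_idx
  intro f
  simp [idxList]
theorem idx_render : ∀ f, PySem.Dict.get? sifIndex f = some "render" ↔ f ∈ (["render.yaml"] : List String).map PySem.Str.lower := by
  have hmap : (["render.yaml"] : List String).map PySem.Str.lower = ["render.yaml"] := by decide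
  rw [hmap]
  apply get?_idx
  intro f
  simp [idxList]
theorem idx_docker : ∀ f, PySem.Dict.get? sifIndex f = some "docker" ↔ f ∈ (["docker-compose.yml", "docker-compose.yaml", "Dockerfile"] : List String).map PySem.Str.lower := by
  have hmap : (["docker-compose.yml", "docker-compose.yaml", "Dockerfile"] : List String).map PySem.Str.lower = ["docker-compose.yml", "docker-compose.yaml", "dockerfile"] := by decide
  rw [hmap]
  apply get?_idx
  intro f
  simp [idxList]
theorem idx_authzero : ∀ f, PySem.Dict.get? sifIndex f = some "auth0" ↔ f ∈ (["auth0"] : List String).map PySem.Str.lower := by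
  have hmap : (["auth0"] : List String).map PySem.Str.lower = ["auth0"] := by decide
  rw [hmap]
  apply get?_idx
  intro f
  simp [idxList]
theorem idx_firebase : ∀ f, PySem.Dict.get? sifIndex f = some "firebase" ↔ f ∈ (["firebase.json", ".firebaserc"] : List String).map PySem.Str.lower := by
  have hmap : (["firebase.json", ".firebaserc"] : List String).map PySem.Str.lower = ["firebase.json", ".firebaserc"] := by decide
  rw [hmap]
  apply get?_idx
  intro f
  simp [idxList]
theorem idx_supabase : ∀ f, PySem.Dict.get? sifIndex f = some "supabase" ↔ f ∈ (["supabase"] : List String).map PySem.Str.lower := by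
  have hmap : (["supabase"] : List String).map PySem.Str.lower = ["supabase"] := by decide
  rw [hmap]
  apply get?_idx
  intro f
  simp [idxList]

theorem filePart_eq (fl : List String) :
    ((sifFiles.map Prod.fst).filter (fun n => PySem.Set.contains
        (PySem.Set.ofList (List.filterMap (fun f => PySem.Dict.get? sifIndex f)
          (PySem.Set.ofList (fl.map PySem.Str.lower)))) n))
      = (sifFiles.filter (fun pr => pr.2.any (fun pat => PySem.Set.contains
          (PySem.Set.ofList (fl.map PySem.Str.lower)) (PySem.Str.lower pat)))).map Prod.fst := by
  rw [List.filter_map]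
  apply congrArg
  apply List.filter_congr
  intro pr hpr
  simp only [sifFiles, List.mem_cons, List.not_mem_nil, or_false] at hpr
  rcases hpr with rfl | rfl | rfl | rfl | rfl | rfl | rfl | rfl
  · exact hits_contains _ "stripe" _ idx_stripe
  · exact hits_contains _ "vercel" _ idx_vercel
  · exact hits_contains _ "railway" _ idx_railway
  · exact hits_contains _ "render" _ idx_render
  · exact hits_contains _ "docker" _ idx_docker
  · exact hits_contains _ "auth0" _ idx_authzero
  · exact hits_contains _ "firebase" _ idx_firebase
  · exact hits_contains _ "supabase" _ idx_supabase

-- A's guarded append loop over the deps, for key-distinct entries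
theorem dep_fold (c : String × List String → Bool) :
    ∀ (l : List (String × List String)) (X : List String), (l.map Prod.fst).Nodup →
    l.foldl (fun m pr =>
        if m.contains pr.1 then m
        else if c pr then m ++ [pr.1] else m) X
      = X ++ ((l.filter c).map Prod.fst).filter (fun x => !X.contains x) := by
  intro l
  induction l with
  | nil => simp
  | cons pr l ih =>
    intro X hnd
    simp only [List.map_cons, List.nodup_cons] at hnd
    simp only [List.foldl_cons]
    by_cases h1 : X.contains pr.1
    · rw [if_pos h1, ih X hnd.2]
      by_cases hc : c pr
      · rw [List.filter_cons_of_pos hc, List.map_cons, List.filter_cons_of_neg (by simp only [h1, Bool.not_true]; simp)]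
      · simp [List.filter_cons, hc]
    · rw [if_neg (by simp_all)]
      by_cases hc : c pr
      · rw [if_pos hc, ih (X ++ [pr.1]) hnd.2]
        have h1' : pr.1 ∉ X := by simpa using h1
        rw [List.filter_cons_of_pos hc, List.map_cons,
            List.filter_cons_of_pos (by simp [h1']),
            List.append_assoc, List.singleton_append]
        have hfe : List.filter (fun x => !(X ++ [pr.1]).contains x) (List.map Prod.fst (List.filter c l))
            = List.filter (fun x => !X.contains x) (List.map Prod.fst (List.filter c l)) := by
          apply List.filter_congr
          intro x hx
          obtain ⟨pr', hpr', rfl⟩ := List.mem_map.1 hx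
          have hxl : pr'.1 ∈ l.map Prod.fst := List.mem_map_of_mem (List.mem_of_mem_filter hpr')
          have hxne : pr'.1 ≠ pr.1 := by rintro h; exact hnd.1 (h ▸ hxl)
          simp [hxne]
        rw [hfe]
      · rw [if_neg hc, ih X hnd.2]
        simp [List.filter_cons, hc]

-- set(X).update(Y) as an append, for X, Y without duplicates
theorem update_eq : ∀ (Y X : List String), X.Nodup → Y.Nodup →
    PySem.Set.update X Y = X ++ Y.filter (fun x => !X.contains x) := by
  intro Y
  induction Y with
  | nil => intro X _ _; simp [PySem.Set.update]
  | cons y Y ih =>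
    intro X hX hY
    simp only [List.nodup_cons] at hY
    show PySem.Set.update (PySem.Set.add X y) Y = _
    by_cases hy : X.contains y
    · have hadd : PySem.Set.add X y = X := by
        simp only [PySem.Set.add, PySem.Set.contains, hy]; simp
      rw [hadd, ih X hX hY.2]
      rw [List.filter_cons_of_neg (by simp only [hy, Bool.not_true]; simp)]
    · have hyf : X.contains y = false := by revert hy; cases X.contains y <;> simp
      have hy' : y ∉ X := by simpa using hy
      have hadd : PySem.Set.add X y = X ++ [y] := by
        simp only [PySem.Set.add, PySem.Set.contains, hyf]; simp
      have hXy : (X ++ [y]).Nodup := by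
        simp [List.nodup_append, hX]
        intro a ha h
        exact hy' (h ▸ ha)
      rw [hadd, ih (X ++ [y]) hXy hY.2]
      rw [List.filter_cons_of_pos (by simp only [hyf, Bool.not_false])]
      simp only [List.append_assoc, List.singleton_append]
      have hfe : List.filter (fun x => !(X ++ [y]).contains x) Y
          = List.filter (fun x => !X.contains x) Y := by
        apply List.filter_congr
        intro x hx
        have hxne : x ≠ y := by rintro rfl; exact hY.1 hx
        simp [hxne]
      rw [hfe]

theorem ofList_append (X Y : List String) (hX : X.Nodup) (hY : Y.Nodup) :
    PySem.Set.ofList (X ++ Y) = X ++ Y.filter (fun x => !X.contains x) := by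
  rw [PySem.Set.ofList_eq_foldl, List.foldl_append, ← PySem.Set.ofList_eq_foldl]
  rw [PySem.Set.ofList_eq_self_of_nodup X hX]
  exact update_eq Y X hX hY

-- ===== VERDICT (by name: the statement is the Claim_ definition above) =====
theorem detect_startup_infra_spec : Claim_equal_detect_startup_infra := by
  intro fl rt _
  show Spec_detect_startup_infra fl rt (detect_startup_infra fl rt)
  unfold Spec_detect_startup_infra
  simp only [detect_startup_infra, detect_startup_infra_alt]
  have hA := PySem.List.foldl_append_if
      (fun pr : String × List String => pr.2.any (fun pat =>
        PySem.Set.contains (PySem.Set.ofList (fl.map PySem.Str.lower)) (PySem.Str.lower pat)))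
      Prod.fst sifFiles []
  rw [List.nil_append] at hA
  have hX : (List.map Prod.fst (List.filter (fun pr => pr.2.any (fun pat =>
      PySem.Set.contains (PySem.Set.ofList (fl.map PySem.Str.lower)) (PySem.Str.lower pat))) sifFiles)).Nodup := by
    exact List.Nodup.sublist (List.filter_sublist.map Prod.fst) (by decide)
  rcases rt with _ | r
  · dsimp only
    rw [List.append_nil, hA, filePart_eq]
  · dsimp only
    by_cases hr : r = ""
    · subst hr
      rw [if_neg (by simp), if_neg (by simp), List.append_nil, hA, filePart_eq]
    · rw [if_pos hr, if_pos hr, hA, filePart_eq fl]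
      rw [dep_fold (fun pr => pr.2.any (fun dep =>
            PySem.Str.isIn (PySem.Str.lower dep) (PySem.Str.lower r))) sifDeps _ (by decide)]
      have hY : (List.map Prod.fst (List.filter (fun pr => pr.2.any (fun dep =>
          PySem.Str.isIn (PySem.Str.lower dep) (PySem.Str.lower r))) sifDeps)).Nodup := by
        exact List.Nodup.sublist (List.filter_sublist.map Prod.fst) (by decide)
      rw [ofList_append _ _ hX hY]
      apply PySem.Set.ofList_eq_self_of_nodup
      apply List.Nodup.append hX (List.Nodup.filter _ hY)
      intro a haX haf
      have hcond := (List.mem_filter.1 haf).2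
      simp only [Bool.not_eq_true'] at hcond
      exact absurd haX (by simpa using hcond)
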